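-- pv_equiv track=rewrite | github.com/Dankular/WebX | steam/extract-image.py | find_rootfs_partition
-- ===== SOURCE A (Python) =====
-- LINUX_DATA_GUID = "0FC63DAF-8483-4772-8E79-3D69D8477DE4"
--
-- def find_rootfs_partition(partitions):
--     """Pick the best rootfs partition (prefer 'rootfs' name, else largest ext4)."""
--     # SteamOS names: 'rootfs', 'root-A', 'SteamOS', 'root'
--     candidates = [p for p in partitions
--                   if any(k in p[0].lower() for k in ("root", "steam", "system"))]
--     if not candidates:
--         candidates = [p for p in partitions if p[3] == LINUX_DATA_GUID]
--     if not candidates: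
--         raise ValueError("Cannot identify rootfs partition. "
--                          "List above shows all partitions — pick manually.")
--     # Prefer largest
--     return max(candidates, key=lambda p: p[2] - p[1])
-- ===== SOURCE B (Python) =====
-- LINUX_DATA_GUID = "0FC63DAF-8483-4772-8E79-3D69D8477DE4"
--
-- def find_rootfs_partition(partitions):
--     """One linear scan: keep the largest name-matching and the largest
--     GUID-matching partition seen so far; prefer the name match."""
--     best_primary = None
--     best_secondary = None
--     for p in partitions:
--         size = p[2] - p[1]
--         name = p[0].lower()
--         if "root" in name or "steam" in name or "system" in name:
--             if best_primary is None or size > best_primary[1]: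
--                 best_primary = (p, size)
--         elif p[3] == LINUX_DATA_GUID:
--             if best_secondary is None or size > best_secondary[1]:
--                 best_secondary = (p, size)
--     if best_primary is not None:
--         return best_primary[0]
--     if best_secondary is not None:
--         return best_secondary[0]
--     raise ValueError("Cannot identify rootfs partition. "
--                      "List above shows all partitions — pick manually.")
-- ===== Notes on version B (the rewrite author's own statement) =====
-- stated objective: alternative
-- what changed: Replaced the two list-comprehension filters plus a final max() pass by a single linear scan that maintains two running best accumulators (best name-match and best GUID-match by size, strict > preserving first-max ties) and picks the primary one after the loop.
import Mathlib
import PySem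

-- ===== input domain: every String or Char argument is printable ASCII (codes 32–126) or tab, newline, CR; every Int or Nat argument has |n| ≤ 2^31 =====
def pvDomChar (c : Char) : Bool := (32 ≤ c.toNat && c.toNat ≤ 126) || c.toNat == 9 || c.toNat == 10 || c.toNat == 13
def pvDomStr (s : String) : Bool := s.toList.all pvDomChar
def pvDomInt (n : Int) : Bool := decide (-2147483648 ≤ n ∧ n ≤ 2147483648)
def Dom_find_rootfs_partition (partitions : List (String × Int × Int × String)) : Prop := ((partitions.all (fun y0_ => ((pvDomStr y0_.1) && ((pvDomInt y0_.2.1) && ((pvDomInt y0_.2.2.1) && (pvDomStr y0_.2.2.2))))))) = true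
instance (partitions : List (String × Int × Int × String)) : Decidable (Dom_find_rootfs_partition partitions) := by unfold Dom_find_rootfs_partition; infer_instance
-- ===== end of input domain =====

-- B replaces A's two filter passes + max() by one linear scan with two running-best accumulators (alternative decomposition, same cost).


def pvLinuxDataGuid : String := "0FC63DAF-8483-4772-8E79-3D69D8477DE4"

-- ===== PORT A =====
-- 'any(k in p[0].lower() for k in ("root", "steam", "system"))'
def pvNameMatchA (p : String × Int × Int × String) : Bool :=
  ["root", "steam", "system"].any (fun k => PySem.Str.isIn k (PySem.Str.lower p.1))

def find_rootfs_partition (partitions : List (String × Int × Int × String)) : String × Int × Int × String :=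
  let candidates := partitions.filter pvNameMatchA
  let candidates := if candidates = [] then partitions.filter (fun p => p.2.2.2 == pvLinuxDataGuid) else candidates
  -- if still empty Python raises ValueError: excluded by Pre_; the port returns a dummy
  match PySem.List.max? candidates (fun p => p.2.2.1 - p.2.1) with
  | some m => m
  | none => ("", 0, 0, "")

-- ===== PORT B =====
def pvNameMatchB (p : String × Int × Int × String) : Bool :=
  PySem.Str.isIn "root" (PySem.Str.lower p.1) || PySem.Str.isIn "steam" (PySem.Str.lower p.1) ||
    PySem.Str.isIn "system" (PySem.Str.lower p.1)

-- 'if best is None or size > best[1]: best = (p, size)'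
def pvUpd (best : Option ((String × Int × Int × String) × Int)) (p : String × Int × Int × String) :
    Option ((String × Int × Int × String) × Int) :=
  let size := p.2.2.1 - p.2.1
  match best with
  | none => some (p, size)
  | some (q, sq) => if size > sq then some (p, size) else some (q, sq)

def find_rootfs_partition_alt (partitions : List (String × Int × Int × String)) : String × Int × Int × String :=
  let st := partitions.foldl
    (fun (st : Option ((String × Int × Int × String) × Int) × Option ((String × Int × Int × String) × Int)) p =>
      if pvNameMatchB p then (pvUpd st.1 p, st.2)
      else if p.2.2.2 == pvLinuxDataGuid then (st.1, pvUpd st.2 p)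
      else st)
    (none, none)
  match st.1 with
  | some (p, _) => p
  | none =>
    match st.2 with
    | some (p, _) => p
    | none => ("", 0, 0, "")   -- Python raises ValueError here; excluded by Pre_

-- ===== PRECONDITION & SPEC =====
-- Pre_ excludes exactly the inputs with no candidate at all (no name match and no Linux-data GUID),
-- on which the Python A raises ValueError.
def Pre_find_rootfs_partition (partitions : List (String × Int × Int × String)) : Prop :=
  (partitions.any (fun p => pvNameMatchB p || p.2.2.2 == pvLinuxDataGuid)) = true
instance (partitions : List (String × Int × Int × String)) : Decidable (Pre_find_rootfs_partition partitions) := by unfold Pre_find_rootfs_partition; infer_instance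

def pvWitness_find_rootfs_partition : (List (String × Int × Int × String)) :=
  [("rootfs", 0, 100, "x"), ("home", 0, 5, "0FC63DAF-8483-4772-8E79-3D69D8477DE4")]

def Spec_find_rootfs_partition (partitions : List (String × Int × Int × String)) (out : String × Int × Int × String) : Prop := out = find_rootfs_partition_alt partitions
instance (partitions : List (String × Int × Int × String)) (out : String × Int × Int × String) : Decidable (Spec_find_rootfs_partition partitions out) := by unfold Spec_find_rootfs_partition; infer_instance

-- ===== CLAIM (what is proved, stated in full; the proofs are below) =====
def Claim_equal_find_rootfs_partition : Prop := ∀ (partitions : List (String × Int × Int × String)), Dom_find_rootfs_partition partitions → Pre_find_rootfs_partition partitions → Spec_find_rootfs_partition partitions (find_rootfs_partition partitions)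

-- ===== LEMMAS AND PROOFS =====

theorem pvNameMatch_eq (p : String × Int × Int × String) : pvNameMatchA p = pvNameMatchB p := by
  simp [pvNameMatchA, pvNameMatchB, List.any, Bool.or_assoc]

-- B's running-best fold computes max? (first maximum) on the same list, paired with its key.
theorem pvUpd_foldl (l : List (String × Int × Int × String))
    (a : Option (String × Int × Int × String)) :
    l.foldl pvUpd (a.map (fun q => (q, q.2.2.1 - q.2.1))) =
      (l.foldl (fun acc x =>
        match acc with
        | none => some x
        | some m => if m.2.2.1 - m.2.1 < x.2.2.1 - x.2.1 then some x else some m) a).map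
        (fun q => (q, q.2.2.1 - q.2.1)) := by
  induction l generalizing a with
  | nil => rfl
  | cons x t ih =>
    cases a with
    | none => simpa using ih (some x)
    | some q =>
      simp only [List.foldl_cons, Option.map_some]
      rw [show pvUpd (some (q, q.2.2.1 - q.2.1)) x =
            Option.map (fun r => (r, r.2.2.1 - r.2.1))
              (if q.2.2.1 - q.2.1 < x.2.2.1 - x.2.1 then some x else some q) by
            simp only [pvUpd, gt_iff_lt]; split_ifs <;> rfl]
      rw [ih]

theorem pvMax?_eq_foldl (l : List (String × Int × Int × String)) :
    PySem.List.max? l (fun p => p.2.2.1 - p.2.1) =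
      l.foldl (fun acc x =>
        match acc with
        | none => some x
        | some m => if m.2.2.1 - m.2.1 < x.2.2.1 - x.2.1 then some x else some m) none := by
  simp only [PySem.List.max?]
  congr 1
  funext acc x
  cases acc <;> rfl

theorem pvAlt_split (partitions : List (String × Int × Int × String)) :
    (partitions.foldl
      (fun (st : Option ((String × Int × Int × String) × Int) × Option ((String × Int × Int × String) × Int)) p =>
        if pvNameMatchB p then (pvUpd st.1 p, st.2)
        else if p.2.2.2 == pvLinuxDataGuid then (st.1, pvUpd st.2 p)
        else st)
      (none, none)) =
    ((partitions.filter pvNameMatchB).foldl pvUpd none,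
     (partitions.filter (fun p => !pvNameMatchB p && p.2.2.2 == pvLinuxDataGuid)).foldl pvUpd none) := by
  rw [show (fun (st : Option ((String × Int × Int × String) × Int) × Option ((String × Int × Int × String) × Int)) p =>
        if pvNameMatchB p then (pvUpd st.1 p, st.2)
        else if p.2.2.2 == pvLinuxDataGuid then (st.1, pvUpd st.2 p)
        else st) =
      (fun st p =>
        (if pvNameMatchB p then pvUpd st.1 p else st.1,
         if !pvNameMatchB p && p.2.2.2 == pvLinuxDataGuid then pvUpd st.2 p else st.2)) by
      funext st p
      by_cases h : pvNameMatchB p = true <;> (simp [h]; try (split_ifs <;> simp_all))]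
  rw [PySem.List.foldl_prod_mk
    (f := fun (a : Option ((String × Int × Int × String) × Int)) p => if pvNameMatchB p then pvUpd a p else a)
    (g := fun (a : Option ((String × Int × Int × String) × Int)) p => if !pvNameMatchB p && p.2.2.2 == pvLinuxDataGuid then pvUpd a p else a)]
  rw [PySem.List.foldl_if_eq_foldl_filter, PySem.List.foldl_if_eq_foldl_filter]

-- ===== VERDICT (by name: the statement is the Claim_ definition above) =====
theorem find_rootfs_partition_spec : Claim_equal_find_rootfs_partition := by
  intro partitions _ hpre
  unfold Spec_find_rootfs_partition find_rootfs_partition find_rootfs_partition_alt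
  dsimp only
  rw [pvAlt_split]
  have hfeq : partitions.filter pvNameMatchA = partitions.filter pvNameMatchB :=
    List.filter_congr (fun p _ => pvNameMatch_eq p)
  by_cases hp : partitions.filter pvNameMatchB = []
  · -- no primary candidate: every element fails pvNameMatchB, A falls back to the GUID filter
    have hnone : ∀ p ∈ partitions, pvNameMatchB p = false := by
      intro p hmem
      by_contra hc
      have : p ∈ partitions.filter pvNameMatchB :=
        List.mem_filter.mpr ⟨hmem, by simpa using hc⟩
      simp [hp] at this
    have hfg : partitions.filter (fun p => !pvNameMatchB p && p.2.2.2 == pvLinuxDataGuid) =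
        partitions.filter (fun p => p.2.2.2 == pvLinuxDataGuid) := by
      apply List.filter_congr
      intro p hmem; simp [hnone p hmem]
    have hg : partitions.filter (fun p => p.2.2.2 == pvLinuxDataGuid) ≠ [] := by
      unfold Pre_find_rootfs_partition at hpre
      rw [List.any_eq_true] at hpre
      obtain ⟨p, hmem, hpp⟩ := hpre
      intro hnil
      rw [hnone p hmem, Bool.false_or] at hpp
      have : p ∈ partitions.filter (fun p => p.2.2.2 == pvLinuxDataGuid) :=
        List.mem_filter.mpr ⟨hmem, hpp⟩
      simp [hnil] at this
    have h2 := pvUpd_foldl (partitions.filter (fun p => p.2.2.2 == pvLinuxDataGuid)) none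
    simp only [Option.map_none] at h2
    rw [hfeq, hp, if_pos rfl, hfg]
    simp only [List.foldl_nil]
    rw [h2, ← pvMax?_eq_foldl]
    cases hmx : PySem.List.max? (partitions.filter (fun p => p.2.2.2 == pvLinuxDataGuid)) (fun p => p.2.2.1 - p.2.1) with
    | none => exact absurd ((PySem.List.max?_eq_none_iff _ _).mp hmx) hg
    | some m => rfl
  · -- a primary candidate exists: A takes max over the name filter, B returns best_primary
    have h1 := pvUpd_foldl (partitions.filter pvNameMatchB) none
    simp only [Option.map_none] at h1
    rw [hfeq, if_neg hp, h1, ← pvMax?_eq_foldl]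
    cases hmx : PySem.List.max? (partitions.filter pvNameMatchB) (fun p => p.2.2.1 - p.2.1) with
    | none => exact absurd ((PySem.List.max?_eq_none_iff _ _).mp hmx) hp
    | some m => rfl
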